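-- pv_equiv track=rewrite | github.com/kiwanowski/UnnamedHB1 | tools/aif2png.py | convert_8bit_image
-- ===== SOURCE A (Python) =====
-- def convert_8bit_image(data, offset, width, height, clut):
--     """Convert 8-bit indexed image to RGBA."""
--     pixels = []
--     img_offset = offset
--
--     for y in range(height):
--         for x in range(width):
--             if img_offset < len(data):
--                 pixel_idx = data[img_offset]
--                 if pixel_idx < len(clut):
--                     pixels.append(clut[pixel_idx])
--                 else:
--                     pixels.append((0, 0, 0, 255))
--                 img_offset += 1
--             else:
--                 pixels.append((0, 0, 0, 255))
--
--     return pixels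
-- ===== SOURCE B (Python) =====
-- def convert_8bit_image(data, offset, width, height, clut):
--     """Convert 8-bit indexed image to RGBA."""
--     black = (0, 0, 0, 255)
--     total = max(0, width) * max(0, height)
--     valid = max(0, min(total, len(data) - offset))
--     pixels = []
--     for i in range(valid):
--         idx = data[offset + i]
--         pixels.append(clut[idx] if idx < len(clut) else black)
--     pixels += [black] * (total - valid)
--     return pixels
-- ===== Notes on version B (the rewrite author's own statement) =====
-- stated objective: simpler
-- what changed: Replaces A's nested y/x loops carrying a running img_offset with a per-pixel bounds check by computing total and the valid prefix length once, then one flat indexed pass over the valid prefix plus a single bulk black-padding step.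
import Mathlib
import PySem

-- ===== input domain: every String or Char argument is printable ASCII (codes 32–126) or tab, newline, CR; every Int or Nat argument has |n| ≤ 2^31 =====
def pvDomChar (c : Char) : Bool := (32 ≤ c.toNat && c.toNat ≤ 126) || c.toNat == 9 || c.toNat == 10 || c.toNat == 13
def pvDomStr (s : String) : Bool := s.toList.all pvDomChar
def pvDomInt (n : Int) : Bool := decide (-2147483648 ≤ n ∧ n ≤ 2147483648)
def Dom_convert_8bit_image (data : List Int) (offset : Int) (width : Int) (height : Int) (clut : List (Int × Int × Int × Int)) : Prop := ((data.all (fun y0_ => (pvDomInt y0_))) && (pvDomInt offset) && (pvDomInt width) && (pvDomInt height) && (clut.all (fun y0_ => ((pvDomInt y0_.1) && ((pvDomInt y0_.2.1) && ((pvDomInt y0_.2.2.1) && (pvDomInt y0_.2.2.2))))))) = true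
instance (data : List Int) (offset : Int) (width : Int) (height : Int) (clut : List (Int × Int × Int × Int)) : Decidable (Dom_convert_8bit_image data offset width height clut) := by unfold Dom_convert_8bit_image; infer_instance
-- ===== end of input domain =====

-- B replaces A's nested y/x loops with per-pixel bounds checks by computing the valid
-- prefix length once, then one flat pass over that prefix plus a bulk black-padding step
-- (objective: simpler; same asymptotic cost).

-- ===== PORT A =====
-- literal transliteration of A: nested for-loops over range(height) / range(width),
-- state = (pixels, img_offset); data[img_offset] / clut[pixel_idx] via pyGetD (in range
-- whenever the Python does not raise, which Pre_ guarantees).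
def convert_8bit_image (data : List Int) (offset : Int) (width : Int) (height : Int) (clut : List (Int × Int × Int × Int)) : List (Int × Int × Int × Int) :=
  let st :=
    (PySem.List.pyRange 0 height 1).foldl (fun st _y =>
      (PySem.List.pyRange 0 width 1).foldl (fun st _x =>
        if st.2 < (data.length : Int) then
          let pixel_idx := PySem.List.pyGetD data st.2 0
          if pixel_idx < (clut.length : Int) then
            (st.1 ++ [PySem.List.pyGetD clut pixel_idx (0, 0, 0, 255)], st.2 + 1)
          else
            (st.1 ++ [(0, 0, 0, 255)], st.2 + 1)
        else
          (st.1 ++ [(0, 0, 0, 255)], st.2)) st)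
      (([] : List (Int × Int × Int × Int)), offset)
  st.1

-- ===== PORT B =====
-- literal transliteration of B: total and valid computed once, one flat loop over
-- range(valid), then bulk padding with [black] * (total - valid).
def convert_8bit_image_alt (data : List Int) (offset : Int) (width : Int) (height : Int) (clut : List (Int × Int × Int × Int)) : List (Int × Int × Int × Int) :=
  let black : Int × Int × Int × Int := (0, 0, 0, 255)
  let total := max 0 width * max 0 height
  let valid := max 0 (min total ((data.length : Int) - offset))
  let pixels :=
    (PySem.List.pyRange 0 valid 1).foldl (fun acc i =>
      let idx := PySem.List.pyGetD data (offset + i) 0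
      acc ++ [if idx < (clut.length : Int) then PySem.List.pyGetD clut idx black else black]) []
  pixels ++ List.replicate (total - valid).toNat black

-- ===== PRECONDITION & SPEC =====
-- Pre_ holds exactly where the Python A returns (and B does too): A raises IndexError
-- when the first read position offset is below -len(data) (negative indexing under-runs
-- data), or when some read data value is below -len(clut) (it passes the
-- 'pixel_idx < len(clut)' test but under-runs clut).  Wherever A returns — including
-- negative-index wraparound reads — B returns the same value, so nothing A returns on
-- is excluded.
def Pre_convert_8bit_image (data : List Int) (offset : Int) (width : Int) (height : Int) (clut : List (Int × Int × Int × Int)) : Prop :=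
  let total := max 0 width * max 0 height
  let valid := max 0 (min total ((data.length : Int) - offset))
  (0 < valid → -(data.length : Int) ≤ offset) ∧
  ∀ i ∈ PySem.List.pyRange 0 valid 1, -((clut.length : Int)) ≤ PySem.List.pyGetD data (offset + i) 0
instance (data : List Int) (offset : Int) (width : Int) (height : Int) (clut : List (Int × Int × Int × Int)) : Decidable (Pre_convert_8bit_image data offset width height clut) := by unfold Pre_convert_8bit_image; infer_instance

def pvWitness_convert_8bit_image : List Int × Int × Int × Int × (List (Int × Int × Int × Int)) :=
  ([1, 0, 5], 0, 2, 3, [(10, 20, 30, 255), (1, 2, 3, 4)])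

def Spec_convert_8bit_image (data : List Int) (offset : Int) (width : Int) (height : Int) (clut : List (Int × Int × Int × Int)) (out : List (Int × Int × Int × Int)) : Prop := out = convert_8bit_image_alt data offset width height clut
instance (data : List Int) (offset : Int) (width : Int) (height : Int) (clut : List (Int × Int × Int × Int)) (out : List (Int × Int × Int × Int)) : Decidable (Spec_convert_8bit_image data offset width height clut out) := by unfold Spec_convert_8bit_image; infer_instance

-- ===== CLAIM (what is proved, stated in full; the proofs are below) =====
def Claim_equal_convert_8bit_image : Prop := ∀ (data : List Int) (offset : Int) (width : Int) (height : Int) (clut : List (Int × Int × Int × Int)), Dom_convert_8bit_image data offset width height clut → Pre_convert_8bit_image data offset width height clut → Spec_convert_8bit_image data offset width height clut (convert_8bit_image data offset width height clut)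

-- ===== LEMMAS AND PROOFS =====

-- the pixel A and B both produce when reading data position j
def pvPix (data : List Int) (clut : List (Int × Int × Int × Int)) (j : Int) : Int × Int × Int × Int :=
  let idx := PySem.List.pyGetD data j 0
  if idx < (clut.length : Int) then PySem.List.pyGetD clut idx (0, 0, 0, 255) else (0, 0, 0, 255)

-- one iteration of A's inner loop body
def pvStep (data : List Int) (clut : List (Int × Int × Int × Int))
    (st : List (Int × Int × Int × Int) × Int) : List (Int × Int × Int × Int) × Int :=
  if st.2 < (data.length : Int) then (st.1 ++ [pvPix data clut st.2], st.2 + 1)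
  else (st.1 ++ [(0, 0, 0, 255)], st.2)

-- the pixel list produced by m iterations of A's loop starting at read position j
def pvSpec (data : List Int) (clut : List (Int × Int × Int × Int)) :
    Nat → Int → List (Int × Int × Int × Int)
  | 0, _ => []
  | m + 1, j =>
    if j < (data.length : Int) then pvPix data clut j :: pvSpec data clut m (j + 1)
    else (0, 0, 0, 255) :: pvSpec data clut m j

theorem pvStep_eq_body (data : List Int) (clut : List (Int × Int × Int × Int))
    (st : List (Int × Int × Int × Int) × Int) :
    (if st.2 < (data.length : Int) then
      let pixel_idx := PySem.List.pyGetD data st.2 0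
      if pixel_idx < (clut.length : Int) then
        (st.1 ++ [PySem.List.pyGetD clut pixel_idx (0, 0, 0, 255)], st.2 + 1)
      else (st.1 ++ [(0, 0, 0, 255)], st.2 + 1)
    else (st.1 ++ [(0, 0, 0, 255)], st.2)) = pvStep data clut st := by
  simp only [pvStep, pvPix]
  split_ifs <;> rfl

theorem pvIter_spec (data : List Int) (clut : List (Int × Int × Int × Int)) (m : Nat) :
    ∀ (acc : List (Int × Int × Int × Int)) (j : Int),
      (pvStep data clut)^[m] (acc, j) = (acc ++ pvSpec data clut m j,
        j + max 0 (min (m : Int) ((data.length : Int) - j))) := by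
  induction m with
  | zero => intro acc j; simp [pvSpec]
  | succ m ih =>
    intro acc j
    rw [Function.iterate_succ_apply]
    by_cases h : j < (data.length : Int)
    · have hs : pvStep data clut (acc, j) = (acc ++ [pvPix data clut j], j + 1) := by
        unfold pvStep; simp [h]
      rw [hs, ih]
      simp only [pvSpec, if_pos h, Prod.mk.injEq]
      refine ⟨by simp, by push_cast; omega⟩
    · have hs : pvStep data clut (acc, j) = (acc ++ [(0, 0, 0, 255)], j) := by
        unfold pvStep; simp [h]
      rw [hs, ih]
      simp only [pvSpec, if_neg h, Prod.mk.injEq]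
      refine ⟨by simp, by push_cast; omega⟩

-- pvSpec in B\'s shape: the first valid reads mapped through pvPix, then black padding
theorem pvSpec_shape (data : List Int) (clut : List (Int × Int × Int × Int)) (m : Nat) :
    ∀ (j : Int),
      pvSpec data clut m j =
        (List.range (min m ((data.length : Int) - j).toNat)).map
          (fun (i : Nat) => pvPix data clut (j + (i : Int))) ++
        List.replicate (m - min m ((data.length : Int) - j).toNat) (0, 0, 0, 255) := by
  induction m with
  | zero => intro j; simp [pvSpec]
  | succ m ih =>
    intro j
    by_cases h : j < (data.length : Int)
    · have hv : min (m + 1) ((data.length : Int) - j).toNat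
          = min m ((data.length : Int) - (j + 1)).toNat + 1 := by omega
      simp only [pvSpec, if_pos h, ih (j + 1), hv, List.range_succ_eq_map,
        List.map_cons, List.map_map, List.cons_append]
      congr 1
      · simp [pvPix]
      congr 1
      · apply List.map_congr_left
        intro i _
        simp only [Function.comp, Nat.succ_eq_add_one]
        congr 1
        push_cast
        ring
      · congr 1
        omega
    · have hv : min (m + 1) ((data.length : Int) - j).toNat = 0 := by omega
      have hv' : min m ((data.length : Int) - j).toNat = 0 := by omega
      simp only [pvSpec, if_neg h, ih j, hv, hv']
      simp [List.replicate_succ]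

theorem convert_8bit_image_eq_alt (data : List Int) (offset : Int) (width : Int)
    (height : Int) (clut : List (Int × Int × Int × Int)) :
    convert_8bit_image data offset width height clut
      = convert_8bit_image_alt data offset width height clut := by
  unfold convert_8bit_image convert_8bit_image_alt
  simp only []
  -- A\'s inner loop body is pvStep; folds over pyRange that ignore the index are iterates
  have hbody : ∀ (st : List (Int × Int × Int × Int) × Int),
      (PySem.List.pyRange 0 width 1).foldl (fun st _x =>
        if st.2 < (data.length : Int) then
          let pixel_idx := PySem.List.pyGetD data st.2 0
          if pixel_idx < (clut.length : Int) then
            (st.1 ++ [PySem.List.pyGetD clut pixel_idx (0, 0, 0, 255)], st.2 + 1)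
          else (st.1 ++ [(0, 0, 0, 255)], st.2 + 1)
        else (st.1 ++ [(0, 0, 0, 255)], st.2)) st
      = (pvStep data clut)^[width.toNat] st := by
    intro st
    have hlen : (PySem.List.pyRange 0 width 1).length = width.toNat := by
      simp [PySem.List.pyRange]; omega
    rw [← hlen, ← List.foldl_const (pvStep data clut) st (PySem.List.pyRange 0 width 1)]
    exact PySem.List.foldl_congr_mem _ _ _ st
      (fun acc x _ => pvStep_eq_body data clut acc)
  simp only [hbody]
  rw [List.foldl_const, ← Function.iterate_mul]
  have hlenh : (PySem.List.pyRange 0 height 1).length = height.toNat := by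
    simp [PySem.List.pyRange]; omega
  rw [hlenh, pvIter_spec]
  -- both sides in mapped-range-plus-padding shape
  have htot : max 0 width * max 0 height = ((width.toNat * height.toNat : Nat) : Int) := by
    rw [max_comm 0 width, max_comm 0 height, ← Int.toNat_eq_max, ← Int.toNat_eq_max]
    push_cast
    ring
  have hvalid : max 0 (min (max 0 width * max 0 height) ((data.length : Int) - offset))
      = ((min (width.toNat * height.toNat) ((data.length : Int) - offset).toNat : Nat) : Int) := by
    rw [htot]; omega
  rw [hvalid, pvSpec_shape, PySem.List.pyRange_zero_natCast,
    PySem.List.foldl_append_singleton_eq_map, List.map_map]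
  simp only [List.nil_append]
  congr 1
  rw [htot]
  congr 1
  omega

-- ===== VERDICT (by name: the statement is the Claim_ definition above) =====
theorem convert_8bit_image_spec : Claim_equal_convert_8bit_image := by
  intro data offset width height clut _ _
  unfold Spec_convert_8bit_image
  exact convert_8bit_image_eq_alt data offset width height clut
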